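-- pv_equiv track=rewrite | github.com/calico-team/calico-fa22 | tetris/submissions/wrong_answer/tetris_ignore_hold.py | solve
-- ===== SOURCE A (Python) =====
-- def solve(N: int, P: str) -> str:
-- 	curr_bag, held_piece = None, None
--
-- 	for piece in P:
-- 		if not curr_bag:
-- 			curr_bag = set('ZLOSIJT')
--
-- 		if piece in curr_bag:
-- 			curr_bag.remove(piece)
-- 		else:
-- 			return 'NO'
-- 	return 'YES'
-- ===== SOURCE B (Python) =====
-- def solve(N: int, P: str) -> str:
--     valid = set('ZLOSIJT')
--     s = P
--     while s:
--         chunk = s[:7]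
--         if len(set(chunk)) != len(chunk) or not set(chunk) <= valid:
--             return 'NO'
--         s = s[7:]
--     return 'YES'
-- ===== Notes on version B (the rewrite author's own statement) =====
-- stated objective: simpler
-- what changed: Replaces the stateful bag simulation (refill a mutable set, remove each piece) with a stateless check of each 7-character window: every window must be duplicate-free and drawn from 'ZLOSIJT'.
import Mathlib
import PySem

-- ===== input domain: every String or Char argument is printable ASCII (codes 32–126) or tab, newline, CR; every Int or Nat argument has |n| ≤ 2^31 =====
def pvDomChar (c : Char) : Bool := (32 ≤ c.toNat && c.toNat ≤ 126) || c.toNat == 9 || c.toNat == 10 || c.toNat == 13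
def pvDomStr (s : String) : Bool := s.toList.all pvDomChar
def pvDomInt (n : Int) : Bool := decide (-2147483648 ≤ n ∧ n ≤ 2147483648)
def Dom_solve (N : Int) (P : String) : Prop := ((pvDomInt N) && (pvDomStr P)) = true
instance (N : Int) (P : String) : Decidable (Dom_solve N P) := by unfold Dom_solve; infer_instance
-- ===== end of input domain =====

-- B replaces A's stateful bag simulation with a stateless per-7-character window
-- check (each window duplicate-free and drawn from 'ZLOSIJT'); objective: simpler.


-- the constant set('ZLOSIJT'), shared by both ports
def pvFull : List Char := PySem.Set.ofList "ZLOSIJT".toList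

-- ===== PORT A =====
-- A's loop: curr_bag starts falsy (None); 'if not curr_bag' refills when empty;
-- set.remove after a successful membership check = PySem.Set.discard.
def solveLoopA (bag : List Char) (cs : List Char) : String :=
  match cs with
  | [] => "YES"
  | piece :: rest =>
    let bag' := if bag.isEmpty then pvFull else bag
    if PySem.Set.contains bag' piece then solveLoopA (PySem.Set.discard bag' piece) rest
    else "NO"

def solve (N : Int) (P : String) : String := solveLoopA [] P.toList

-- ===== PORT B =====
-- chunk check: len(set(chunk)) == len(chunk) and set(chunk) <= valid
def pvChunkOk (chunk : List Char) : Bool :=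
  ((PySem.Set.ofList chunk).length == chunk.length) &&
  PySem.Set.issubset (PySem.Set.ofList chunk) pvFull

-- Source B's while loop over the remaining string; s[:7] = take 7, s[7:] = drop 7
-- (PySem.List.slice_to_natCast / slice_from_natCast).
def solveLoopB : List Char → String
  | [] => "YES"
  | c :: rest =>
    if pvChunkOk ((c :: rest).take 7) then solveLoopB ((c :: rest).drop 7) else "NO"
  termination_by cs => cs.length
  decreasing_by simp

def solve_alt (N : Int) (P : String) : String := solveLoopB P.toList

-- ===== PRECONDITION & SPEC =====
def Spec_solve (N : Int) (P : String) (out : String) : Prop := out = solve_alt N P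
instance (N : Int) (P : String) (out : String) : Decidable (Spec_solve N P out) := by
  unfold Spec_solve; infer_instance

-- ===== CLAIM (what is proved, stated in full; the proofs are below) =====
def Claim_equal_solve : Prop := ∀ (N : Int) (P : String), Dom_solve N P → Spec_solve N P (solve N P)

-- ===== LEMMAS AND PROOFS =====

theorem pvFull_nodup : pvFull.Nodup := by decide

theorem pvFull_length : pvFull.length = 7 := by decide

theorem filter_ne_eq_self {s : List Char} {x : Char} (h : x ∉ s) :
    s.filter (fun y => !(y == x)) = s := by
  apply List.filter_eq_self.mpr
  intro a ha
  simp only [Bool.not_eq_true', beq_eq_false_iff_ne, ne_eq]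
  exact fun e => h (e ▸ ha)

theorem discard_eq_erase (s : List Char) (x : Char) (h : s.Nodup) :
    PySem.Set.discard s x = s.erase x := by
  induction s with
  | nil => rfl
  | cons a t ih =>
    rcases List.nodup_cons.mp h with ⟨ha, ht⟩
    by_cases hax : a = x
    · subst hax
      simp [PySem.Set.discard, filter_ne_eq_self ha]
    · simp [PySem.Set.discard, hax]
      exact ih ht

theorem foldl_discard_length (chunk : List Char) :
    ∀ bag : List Char, chunk.Nodup → (∀ c ∈ chunk, c ∈ bag) → bag.Nodup →
    (chunk.foldl PySem.Set.discard bag).length = bag.length - chunk.length := by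
  induction chunk with
  | nil => intro bag _ _ _; simp
  | cons c ch ih =>
    intro bag hnd hsub hbag
    rcases List.nodup_cons.mp hnd with ⟨hc, hch⟩
    have hcb : c ∈ bag := hsub c (List.mem_cons_self ..)
    have h1 : PySem.Set.discard bag c = bag.erase c := discard_eq_erase bag c hbag
    have hlen : (bag.erase c).length = bag.length - 1 := List.length_erase_of_mem hcb
    have hpos : 1 ≤ bag.length := List.length_pos_of_mem hcb
    have hmem : ∀ d ∈ ch, d ∈ bag.erase c := by
      intro d hd
      exact (List.Nodup.mem_erase_iff hbag).mpr ⟨fun e => hc (e ▸ hd), hsub d (List.mem_cons_of_mem _ hd)⟩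
    have := ih (bag.erase c) hch hmem (hbag.erase c)
    simp only [List.foldl_cons, h1, this, hlen, List.length_cons]
    omega

theorem ofList_sublist (xs : List Char) : (PySem.Set.ofList xs).Sublist xs := by
  induction xs with
  | nil => simp [PySem.Set.ofList, PySem.Set.empty]
  | cons x t ih =>
    rw [PySem.Set.ofList_cons]
    exact List.Sublist.cons₂ x ((List.filter_sublist).trans ih)

theorem ofList_length_eq_iff (xs : List Char) :
    (PySem.Set.ofList xs).length = xs.length ↔ xs.Nodup := by
  constructor
  · intro h
    have := (ofList_sublist xs).eq_of_length h
    exact this ▸ PySem.Set.nodup_ofList xs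
  · intro h
    rw [PySem.Set.ofList_eq_self_of_nodup xs h]

theorem chunkOk_iff (chunk : List Char) :
    pvChunkOk chunk = true ↔ chunk.Nodup ∧ ∀ c ∈ chunk, c ∈ pvFull := by
  unfold pvChunkOk
  rw [Bool.and_eq_true, beq_iff_eq, ofList_length_eq_iff, PySem.Set.issubset_iff]
  constructor
  · rintro ⟨h1, h2⟩
    exact ⟨h1, fun c hc => h2 c ((PySem.Set.mem_ofList _ _).mpr hc)⟩
  · rintro ⟨h1, h2⟩
    exact ⟨h1, fun c hc => h2 c ((PySem.Set.mem_ofList _ _).mp hc)⟩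

theorem loopA_run (chunk : List Char) :
    ∀ (rest bag : List Char), bag.Nodup → chunk.length ≤ bag.length →
    solveLoopA bag (chunk ++ rest) =
      if chunk.Nodup ∧ ∀ c ∈ chunk, c ∈ bag
      then solveLoopA (chunk.foldl PySem.Set.discard bag) rest
      else "NO" := by
  induction chunk with
  | nil => intro rest bag _ _; simp
  | cons c ch ih =>
    intro rest bag hbag hlen
    have hne : bag.isEmpty = false := by
      cases bag with
      | nil => simp at hlen
      | cons _ _ => rfl
    rw [List.cons_append, solveLoopA]
    simp only [hne, Bool.false_eq_true, if_false]
    by_cases hcb : c ∈ bag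
    · have hcont : PySem.Set.contains bag c = true := (PySem.Set.contains_iff _ _).mpr hcb
      rw [if_pos hcont]
      have h1 : PySem.Set.discard bag c = bag.erase c := discard_eq_erase bag c hbag
      have hlen' : ch.length ≤ (bag.erase c).length := by
        have := List.length_erase_of_mem hcb
        simp only [List.length_cons] at hlen
        omega
      have := ih rest (bag.erase c) (hbag.erase c) hlen'
      rw [h1, List.foldl_cons, h1, this]
      by_cases hcase : ch.Nodup ∧ ∀ d ∈ ch, d ∈ bag.erase c
      · rw [if_pos hcase, if_pos]
        refine ⟨List.nodup_cons.mpr ⟨fun hc => ?_, hcase.1⟩, ?_⟩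
        · exact ((List.Nodup.mem_erase_iff hbag).mp (hcase.2 c hc)).1 rfl
        · intro d hd
          rcases List.mem_cons.mp hd with h | h
          · exact h ▸ hcb
          · exact ((List.Nodup.mem_erase_iff hbag).mp (hcase.2 d h)).2
      · rw [if_neg hcase, if_neg]
        intro ⟨hnd, hsub⟩
        rcases List.nodup_cons.mp hnd with ⟨hc, hch⟩
        apply hcase
        refine ⟨hch, fun d hd => ?_⟩
        exact (List.Nodup.mem_erase_iff hbag).mpr
          ⟨fun e => hc (e ▸ hd), hsub d (List.mem_cons_of_mem _ hd)⟩
    · have hcont : PySem.Set.contains bag c = false := by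
        rw [← Bool.not_eq_true]
        exact fun h => hcb ((PySem.Set.contains_iff _ _).mp h)
      rw [hcont]
      simp only [Bool.false_eq_true, if_false]
      rw [if_neg]
      intro ⟨_, hsub⟩
      exact hcb (hsub c (List.mem_cons_self ..))

theorem loopA_refill (cs : List Char) : solveLoopA [] cs = solveLoopA pvFull cs := by
  cases cs with
  | nil => rfl
  | cons c rest =>
    rw [solveLoopA, solveLoopA]
    simp [pvFull]

theorem loopAB : ∀ cs : List Char, solveLoopA [] cs = solveLoopB cs
  | [] => by simp [solveLoopA, solveLoopB]
  | c :: rest => by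
    rw [loopA_refill]
    simp only [solveLoopB]
    have hsplit : c :: rest = (c :: rest).take 7 ++ (c :: rest).drop 7 :=
      (List.take_append_drop _ _).symm
    have hlen : ((c :: rest).take 7).length ≤ pvFull.length := by
      rw [pvFull_length]; simp [List.length_take]
    conv_lhs => rw [hsplit]
    rw [loopA_run _ _ _ pvFull_nodup hlen]
    by_cases hok : pvChunkOk ((c :: rest).take 7) = true
    · rw [if_pos hok, if_pos ((chunkOk_iff _).mp hok)]
      rcases (chunkOk_iff _).mp hok with ⟨hnd, hsub⟩
      by_cases hlong : (c :: rest).length ≤ 7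
      · have hdrop : (c :: rest).drop 7 = [] := List.drop_eq_nil_of_le hlong
        rw [hdrop]
        simp [solveLoopA, solveLoopB]
      · have htake : ((c :: rest).take 7).length = 7 :=
          List.length_take_of_le (le_of_lt (not_le.mp hlong))
        have hempty : ((c :: rest).take 7).foldl PySem.Set.discard pvFull = [] := by
          apply List.eq_nil_of_length_eq_zero
          rw [foldl_discard_length _ _ hnd hsub pvFull_nodup, htake, pvFull_length]
        rw [hempty]
        exact loopAB ((c :: rest).drop 7)
    · rw [if_neg hok, if_neg (fun h => hok ((chunkOk_iff _).mpr h))]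
  termination_by cs => cs.length
  decreasing_by simp

-- ===== VERDICT (by name: the statement is the Claim_ definition above) =====
theorem solve_spec : Claim_equal_solve := by
  intro N P _
  unfold Spec_solve solve solve_alt
  exact loopAB P.toList
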